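-- pv_equiv track=rewrite | github.com/2UJ1N/Algorithm | CodingTest/2024KaKaoIntern/final/test2.py | find_graph_type
-- ===== SOURCE A (Python) =====
-- def find_graph_type(graph, dot):
--     graph_type = [0, 0, 0]
--
--     for d in graph[dot]:
--         vertex_cnt = 0
--         edge_cnt = 0
--
--         visited = set()
--         stack = [d]
--
--         while stack:
--             current = stack.pop()
--
--             if current not in visited:
--                 visited.add(current)
--                 vertex_cnt += 1
--
--                 if current in graph:
--                     edge_cnt += len(graph[current])
--
--                     for next_dot in graph[current]:
--                         if next_dot not in visited:
--                             stack.append(next_dot)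
--
--         if vertex_cnt == edge_cnt:
--             graph_type[0] += 1
--         elif edge_cnt == vertex_cnt - 1:
--             graph_type[1] += 1
--         else:
--             graph_type[2] += 1
--
--     return graph_type
-- ===== SOURCE B (Python) =====
-- def find_graph_type(graph, dot):
--     # Reachability computed as a bounded fixpoint of one-step successor
--     # expansion over whole sets (no stack or queue); counts read off the
--     # final reachable set.
--     bound = 1 + len(graph) + sum(len(v) for v in graph.values())
--     graph_type = [0, 0, 0]
--     for d in graph[dot]:
--         reach = {d}
--         for _ in range(bound):
--             bigger = reach | {y for x in reach for y in graph.get(x, [])}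
--             if bigger == reach:
--                 break
--             reach = bigger
--         vertex_cnt = len(reach)
--         edge_cnt = sum(len(graph.get(x, [])) for x in reach)
--         if vertex_cnt == edge_cnt:
--             graph_type[0] += 1
--         elif edge_cnt == vertex_cnt - 1:
--             graph_type[1] += 1
--         else:
--             graph_type[2] += 1
--     return graph_type
-- ===== Notes on version B (the rewrite author's own statement) =====
-- stated objective: alternative
-- what changed: Replaces the explicit-stack DFS with pop-time marking and running counters by a traversal-free bounded fixpoint iteration: the reachable set is grown by whole-set one-step successor expansion until it stops changing, and the vertex/edge counts are read off the final set.
import Mathlib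
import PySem

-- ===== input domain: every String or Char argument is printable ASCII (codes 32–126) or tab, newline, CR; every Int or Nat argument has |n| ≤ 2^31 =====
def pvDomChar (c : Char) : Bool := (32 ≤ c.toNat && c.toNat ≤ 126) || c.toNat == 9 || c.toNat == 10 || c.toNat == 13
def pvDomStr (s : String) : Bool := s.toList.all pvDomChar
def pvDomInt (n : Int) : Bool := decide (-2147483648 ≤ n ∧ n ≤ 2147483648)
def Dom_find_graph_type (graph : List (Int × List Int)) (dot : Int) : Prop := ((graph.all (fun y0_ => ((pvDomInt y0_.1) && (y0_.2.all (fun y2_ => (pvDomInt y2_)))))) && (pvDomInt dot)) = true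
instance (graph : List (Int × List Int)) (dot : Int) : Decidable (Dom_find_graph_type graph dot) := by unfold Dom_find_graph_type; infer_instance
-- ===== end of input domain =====

-- B replaces A's stack DFS (pop-time marking, duplicate stack entries, running counters)
-- by a bounded fixpoint iteration: the reachable set is expanded by whole-set one-step
-- successor unions until it stops changing, and the counts are read off the final set.

-- ===== PORT A =====
-- adjacency lookup on the association list: first match, [] when the key is absent
-- (covers both `graph.get(v, [])` and the guarded `if v in graph: ... graph[v]`)
def succsOf (g : List (Int × List Int)) (v : Int) : List Int :=
  match g.find? (fun p => p.1 == v) with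
  | some p => p.2
  | none => []

-- finite universe of all ints that can ever enter the visited set
-- (keys and adjacency values): used only for the termination measure, not by the algorithm
def uniA (g : List (Int × List Int)) : Finset Int := (g.map Prod.fst ++ g.flatMap Prod.snd).toFinset

def maxDegA (g : List (Int × List Int)) : Nat := (g.map (fun p => p.2.length)).foldr max 0

-- termination helper lemmas, cited by the decreasing_by block below
lemma succsOf_len_le (g : List (Int × List Int)) (v : Int) : (succsOf g v).length ≤ maxDegA g := by
  induction g with
  | nil => simp [succsOf, maxDegA]
  | cons p g ih =>
    by_cases h : p.1 = v
    · simp [succsOf, maxDegA, List.find?, h]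
    · have hf : List.find? (fun p => p.1 == v) (p :: g) = List.find? (fun p => p.1 == v) g :=
        List.find?_cons_of_neg (by simp [h])
      simp only [succsOf, maxDegA, hf, List.map_cons, List.foldr_cons] at *
      exact le_trans ih (le_max_right _ _)

lemma succsOf_eq_nil_of_not_mem (g : List (Int × List Int)) (v : Int) (h : v ∉ uniA g) : succsOf g v = [] := by
  unfold succsOf
  rcases hf : g.find? (fun p => p.1 == v) with _ | p
  · rw [hf]
  · exfalso
    have hp := List.mem_of_find?_eq_some hf
    have hv : p.1 = v := by simpa using List.find?_some hf
    apply h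
    simp only [uniA, List.toFinset_append, Finset.mem_union, List.mem_toFinset, List.mem_map]
    exact Or.inl ⟨p, hp, hv⟩

lemma toFinset_set_add (s : PySem.Set Int) (x : Int) : (PySem.Set.add s x).toFinset = insert x s.toFinset := by
  by_cases h : x ∈ s
  · rw [PySem.Set.add_of_mem h]
    exact (Finset.insert_eq_self.mpr (List.mem_toFinset.mpr h)).symm
  · rw [PySem.Set.add_of_not_mem h, List.toFinset_append]
    simp

-- the `while stack:` loop of A: pop, mark-if-unvisited, count, push unvisited successors
-- (Python appends then pops the END; modelled with the stack top at the list head,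
-- so the pushed block is reversed — exactly the order Python pops it)
def loopA (g : List (Int × List Int)) (visited : PySem.Set Int) (stack : List Int) (vcnt ecnt : Int) : PySem.Set Int × Int × Int :=
  match stack with
  | [] => (visited, vcnt, ecnt)
  | current :: rest =>
    if PySem.Set.contains visited current then
      loopA g visited rest vcnt ecnt
    else
      -- visited.add(current); vertex_cnt += 1;
      -- if current in graph: edge_cnt += len(graph[current]) and push unvisited successors
      -- (succsOf is [] for an absent key, so both the count and the pushes are no-ops then)
      loopA g (PySem.Set.add visited current)
        (((succsOf g current).filter (fun x => !PySem.Set.contains (PySem.Set.add visited current) x)).reverse ++ rest)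
        (vcnt + 1) (ecnt + ((succsOf g current).length : Int))
termination_by (maxDegA g + 2) * ((uniA g) \ visited.toFinset).card + stack.length
decreasing_by
  · simp only [List.length_cons]; omega
  · rename_i hvc
    have hnv : current ∉ visited.toFinset := by
      simp only [List.mem_toFinset]
      intro hm; exact hvc ((PySem.Set.contains_iff _ _).mpr hm)
    simp only [List.length_append, List.length_reverse, List.length_cons, toFinset_set_add]
    have h3 : ((succsOf g current).filter (fun x => !PySem.Set.contains (PySem.Set.add visited current) x)).length ≤ maxDegA g :=
      le_trans (List.length_filter_le _ _) (succsOf_len_le g current)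
    by_cases hc : current ∈ uniA g
    · have hmem : current ∈ uniA g \ visited.toFinset := Finset.mem_sdiff.mpr ⟨hc, hnv⟩
      have h1 : (uniA g \ insert current visited.toFinset).card = (uniA g \ visited.toFinset).card - 1 := by
        rw [Finset.sdiff_insert, Finset.card_erase_of_mem hmem]
      have h2 : 1 ≤ (uniA g \ visited.toFinset).card := Finset.card_pos.mpr ⟨current, hmem⟩
      have hb : (uniA g \ visited.toFinset).card = (uniA g \ insert current visited.toFinset).card + 1 := by omega
      rw [hb, Nat.mul_succ]
      omega
    · rw [succsOf_eq_nil_of_not_mem g current hc] at h3 ⊢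
      simp only [List.filter_nil, List.length_nil] at h3 ⊢
      have hle : (uniA g \ insert current visited.toFinset).card ≤ (uniA g \ visited.toFinset).card := by
        apply Finset.card_le_card
        intro y hy
        rw [Finset.mem_sdiff] at *
        exact ⟨hy.1, fun hm => hy.2 (Finset.mem_insert_of_mem hm)⟩
      have := Nat.mul_le_mul_left (maxDegA g + 2) hle
      omega

def find_graph_type (graph : List (Int × List Int)) (dot : Int) : List Int :=
  -- `graph[dot]` raises KeyError when dot is not a key: excluded by Pre_find_graph_type
  ((succsOf graph dot).foldl (fun (t : Int × Int × Int) d =>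
    let r := loopA graph PySem.Set.empty [d] 0 0
    if r.2.1 = r.2.2 then (t.1 + 1, t.2.1, t.2.2)
    else if r.2.2 = r.2.1 - 1 then (t.1, t.2.1 + 1, t.2.2)
    else (t.1, t.2.1, t.2.2 + 1)) (0, 0, 0)
  ) |> fun t => [t.1, t.2.1, t.2.2]

-- ===== PORT B =====
-- the `for _ in range(bound):` loop of B: expand the whole set by one successor step,
-- stop early at the fixpoint (`if bigger == reach: break`); the comprehension's set is
-- built here from the flatMap of successor lists — as a SET it does not depend on the
-- iteration order of `reach`, which is all B ever uses of it
def iterExpand (g : List (Int × List Int)) : Nat → PySem.Set Int → PySem.Set Int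
  | 0, reach => reach
  | fuel + 1, reach =>
    let bigger := PySem.Set.union reach (reach.flatMap (fun x => succsOf g x))
    if PySem.Set.equal bigger reach then reach
    else iterExpand g fuel bigger

def find_graph_type_alt (graph : List (Int × List Int)) (dot : Int) : List Int :=
  -- `graph[dot]` raises KeyError when dot is not a key: excluded by Pre_find_graph_type
  let bound := 1 + graph.length + (graph.map (fun p => p.2.length)).sum
  ((succsOf graph dot).foldl (fun (t : Int × Int × Int) d =>
    let reach := iterExpand graph bound (PySem.Set.ofList [d])
    let vertex_cnt : Int := reach.length
    let edge_cnt : Int := (reach.map (fun x => ((succsOf graph x).length : Int))).sum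
    if vertex_cnt = edge_cnt then (t.1 + 1, t.2.1, t.2.2)
    else if edge_cnt = vertex_cnt - 1 then (t.1, t.2.1 + 1, t.2.2)
    else (t.1, t.2.1, t.2.2 + 1)) (0, 0, 0)
  ) |> fun t => [t.1, t.2.1, t.2.2]

-- ===== PRECONDITION & SPEC =====
-- Pre_ excludes exactly the inputs on which Python raises KeyError at `graph[dot]` (dot not a key)
def Pre_find_graph_type (graph : List (Int × List Int)) (dot : Int) : Prop :=
  (graph.find? (fun p => p.1 == dot)).isSome = true
instance (graph : List (Int × List Int)) (dot : Int) : Decidable (Pre_find_graph_type graph dot) := by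
  unfold Pre_find_graph_type; infer_instance

def pvWitness_find_graph_type : (List (Int × List Int)) × Int := ([(1, [2]), (2, [1])], 1)

def Spec_find_graph_type (graph : List (Int × List Int)) (dot : Int) (out : List Int) : Prop := out = find_graph_type_alt graph dot
instance (graph : List (Int × List Int)) (dot : Int) (out : List Int) : Decidable (Spec_find_graph_type graph dot out) := by unfold Spec_find_graph_type; infer_instance

-- ===== CLAIM (what is proved, stated in full; the proofs are below) =====
def Claim_equal_find_graph_type : Prop := ∀ (graph : List (Int × List Int)) (dot : Int), Dom_find_graph_type graph dot → Pre_find_graph_type graph dot → Spec_find_graph_type graph dot (find_graph_type graph dot)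

-- ===== LEMMAS AND PROOFS =====

lemma succsOf_subset_uni (g : List (Int × List Int)) (v x : Int) (hx : x ∈ succsOf g v) : x ∈ uniA g := by
  unfold succsOf at hx
  rcases hf : g.find? (fun p => p.1 == v) with _ | p
  · rw [hf] at hx; simp at hx
  · rw [hf] at hx
    have hp := List.mem_of_find?_eq_some hf
    simp [uniA, List.mem_flatMap]
    right; exact ⟨p.1, p.2, by simpa using hp, hx⟩

-- Characterization of A's DFS loop: its visited-set result S is the least superset of
-- `visited` containing the stack and closed under succsOf (given that `visited` is already
-- closed modulo the stack), and the counters move by |S| - |visited| and by the degree sums.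
lemma loopA_spec (g : List (Int × List Int)) (visited : PySem.Set Int) (stack : List Int) (vcnt ecnt : Int)
    (hcl : ∀ x ∈ visited, ∀ y ∈ succsOf g x, y ∈ visited ∨ y ∈ stack) :
    ∃ S : PySem.Set Int,
      loopA g visited stack vcnt ecnt =
        (S, vcnt + ((S.toFinset.card : Int) - (visited.toFinset.card : Int)),
            ecnt + (S.toFinset.sum (fun x => ((succsOf g x).length : Int)) -
                    visited.toFinset.sum (fun x => ((succsOf g x).length : Int)))) ∧
      visited.toFinset ⊆ S.toFinset ∧
      (∀ x ∈ stack, x ∈ S.toFinset) ∧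
      (∀ x ∈ S.toFinset, ∀ y ∈ succsOf g x, y ∈ S.toFinset) ∧
      (∀ T : Finset Int, visited.toFinset ⊆ T → (∀ x ∈ stack, x ∈ T) →
        (∀ x ∈ T, ∀ y ∈ succsOf g x, y ∈ T) → S.toFinset ⊆ T) := by
  fun_induction loopA g visited stack vcnt ecnt with
  | case1 visited vcnt ecnt =>
    refine ⟨visited, by simp, Finset.Subset.refl _, by simp, ?_, ?_⟩
    · intro x hx y hy
      rcases hcl x (List.mem_toFinset.mp hx) y hy with h | h
      · exact List.mem_toFinset.mpr h
      · simp at h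
    · intro T hT _ _; exact hT
  | case2 visited vcnt ecnt current rest hcont ih =>
    have hcv : current ∈ visited := (PySem.Set.contains_iff _ _).mp hcont
    obtain ⟨S, heq, hsub, hstk, hclS, hmin⟩ := ih (by
      intro x hx y hy
      rcases hcl x hx y hy with h | h
      · exact Or.inl h
      · rcases List.mem_cons.mp h with rfl | h
        · exact Or.inl hcv
        · exact Or.inr h)
    exact ⟨S, heq, hsub, by
      intro x hx
      rcases List.mem_cons.mp hx with rfl | hx
      · exact hsub (List.mem_toFinset.mpr hcv)
      · exact hstk x hx, hclS, by
      intro T h1 h2 h3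
      exact hmin T h1 (fun x hx => h2 x (List.mem_cons_of_mem _ hx)) h3⟩
  | case3 visited vcnt ecnt current rest hcont ih =>
    have hnv : current ∉ visited := fun hm => hcont ((PySem.Set.contains_iff _ _).mpr hm)
    have hnvF : current ∉ visited.toFinset := fun hm => hnv (List.mem_toFinset.mp hm)
    obtain ⟨S, heq, hsub, hstk, hclS, hmin⟩ := ih (by
      intro x hx y hy
      rcases (PySem.Set.mem_add _ _ _).mp hx with hx | rfl
      · rcases hcl x hx y hy with h | h
        · exact Or.inl ((PySem.Set.mem_add _ _ _).mpr (Or.inl h))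
        · rcases List.mem_cons.mp h with rfl | h
          · exact Or.inl ((PySem.Set.mem_add _ _ _).mpr (Or.inr rfl))
          · exact Or.inr (List.mem_append_right _ h)
      · by_cases hy2 : PySem.Set.contains (PySem.Set.add visited x) y
        · exact Or.inl ((PySem.Set.contains_iff _ _).mp hy2)
        · refine Or.inr (List.mem_append_left _ ?_)
          rw [List.mem_reverse]
          exact List.mem_filter.mpr ⟨hy, by rw [eq_false_of_ne_true hy2]; rfl⟩)
    have hcard : (insert current visited.toFinset).card = visited.toFinset.card + 1 :=
      Finset.card_insert_of_notMem hnvF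
    have hsum : (insert current visited.toFinset).sum (fun x => ((succsOf g x).length : Int)) =
        ((succsOf g current).length : Int) + visited.toFinset.sum (fun x => ((succsOf g x).length : Int)) :=
      Finset.sum_insert hnvF
    rw [toFinset_set_add] at heq hsub hmin
    refine ⟨S, ?_, ?_, ?_, hclS, ?_⟩
    · rw [heq, hcard, hsum]
      refine Prod.ext rfl (Prod.ext ?_ ?_) <;> · simp only []; push_cast; ring
    · exact Finset.Subset.trans (Finset.subset_insert _ _) hsub
    · intro x hx
      rcases List.mem_cons.mp hx with rfl | hx
      · exact hsub (Finset.mem_insert_self _ _)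
      · exact hstk x (List.mem_append_right _ hx)
    · intro T h1 h2 h3
      have hcT : current ∈ T := h2 current List.mem_cons_self
      refine hmin T (Finset.insert_subset hcT h1) ?_ h3
      intro x hx
      rcases List.mem_append.mp hx with hx | hx
      · rw [List.mem_reverse] at hx
        exact h3 current hcT x (List.mem_filter.mp hx).1
      · exact h2 x (List.mem_cons_of_mem _ hx)

-- Characterization of B's fixpoint loop: for any finite V absorbing every successor and
-- containing the current set, the result stays duplicate-free, contains the current set,
-- is contained in every succsOf-closed superset of it, and — whenever the fuel exceeds
-- the number of still-missing elements of V — is closed under succsOf.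
lemma iterExpand_spec (g : List (Int × List Int)) (V : Finset Int)
    (hV : ∀ x y, y ∈ succsOf g x → y ∈ V) :
    ∀ (fuel : Nat) (S : PySem.Set Int), S.Nodup → (∀ x ∈ S, x ∈ V) →
    (iterExpand g fuel S).Nodup ∧
    (∀ x ∈ S, x ∈ iterExpand g fuel S) ∧
    (∀ T : Finset Int, (∀ x ∈ T, ∀ y ∈ succsOf g x, y ∈ T) → (∀ x ∈ S, x ∈ T) →
      ∀ x ∈ iterExpand g fuel S, x ∈ T) ∧
    ((V \ S.toFinset).card < fuel →
      ∀ x ∈ iterExpand g fuel S, ∀ y ∈ succsOf g x, y ∈ iterExpand g fuel S) := by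
  intro fuel
  induction fuel with
  | zero =>
    intro S hnd _
    exact ⟨hnd, fun x h => h, fun T _ hST x hx => hST x hx, fun h => absurd h (Nat.not_lt_zero _)⟩
  | succ fuel ih =>
    intro S hnd hSV
    simp only [iterExpand]
    set bigger := PySem.Set.union S (S.flatMap (fun x => succsOf g x)) with hbig
    have hSb : ∀ x ∈ S, x ∈ bigger := fun x hx => (PySem.Set.mem_union _ _ _).mpr (Or.inl hx)
    by_cases he : PySem.Set.equal bigger S = true
    · rw [if_pos he]
      have hiff := (PySem.Set.equal_iff _ _).mp he
      refine ⟨hnd, fun x h => h, fun T _ hST x hx => hST x hx, fun _ x hx y hy => ?_⟩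
      exact (hiff y).mp ((PySem.Set.mem_union _ _ _).mpr (Or.inr (List.mem_flatMap.mpr ⟨x, hx, hy⟩)))
    · rw [if_neg he]
      have hbV : ∀ x ∈ bigger, x ∈ V := by
        intro x hx
        rcases (PySem.Set.mem_union _ _ _).mp hx with h | h
        · exact hSV x h
        · obtain ⟨z, _, hz⟩ := List.mem_flatMap.mp h
          exact hV z x hz
      have hbnd : bigger.Nodup := PySem.Set.nodup_union _ _ hnd
      -- some element of `bigger` is new, so the missing part of V strictly shrinks
      have hwit : ∃ z, z ∈ bigger ∧ z ∉ S := by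
        by_contra hno
        push Not at hno
        exact he ((PySem.Set.equal_iff _ _).mpr (fun x => ⟨fun hx => by
          by_contra hxs
          exact hxs (hno x hx), hSb x⟩))
      obtain ⟨z, hzb, hzs⟩ := hwit
      have hss : V \ bigger.toFinset ⊂ V \ S.toFinset := by
        constructor
        · intro y hy
          rw [Finset.mem_sdiff] at *
          exact ⟨hy.1, fun hm => hy.2 (List.mem_toFinset.mpr (hSb y (List.mem_toFinset.mp hm)))⟩
        · intro hsub
          have hz : z ∈ V \ S.toFinset :=
            Finset.mem_sdiff.mpr ⟨hbV z hzb, fun hm => hzs (List.mem_toFinset.mp hm)⟩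
          have := Finset.mem_sdiff.mp (hsub hz)
          exact this.2 (List.mem_toFinset.mpr hzb)
      obtain ⟨i1, i2, i3, i4⟩ := ih bigger hbnd hbV
      refine ⟨i1, fun x hx => i2 x (hSb x hx), ?_, ?_⟩
      · intro T hcl hST x hx
        refine i3 T hcl ?_ x hx
        intro y hy
        rcases (PySem.Set.mem_union _ _ _).mp hy with h | h
        · exact hST y h
        · obtain ⟨w, hw, hyw⟩ := List.mem_flatMap.mp h
          exact hcl w (hST w hw) y hyw
      · intro hlt
        have := Finset.card_lt_card hss
        exact i4 (by omega)

-- Both computations from the same start node d determine the same set of nodes (the least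
-- succsOf-closed set containing d), so the per-node counts agree.
lemma counts_eq (g : List (Int × List Int)) (d : Int) :
    (loopA g PySem.Set.empty [d] 0 0).2.1 =
      ((iterExpand g (1 + g.length + (g.map (fun p => p.2.length)).sum) (PySem.Set.ofList [d])).length : Int) ∧
    (loopA g PySem.Set.empty [d] 0 0).2.2 =
      ((iterExpand g (1 + g.length + (g.map (fun p => p.2.length)).sum) (PySem.Set.ofList [d])).map
        (fun x => ((succsOf g x).length : Int))).sum := by
  obtain ⟨S, heq, hsubA, hstkA, hclA, hminA⟩ :=
    loopA_spec g PySem.Set.empty [d] 0 0 (by intro x hx; simp [PySem.Set.empty] at hx)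
  have hd1 : PySem.Set.ofList [d] = [d] := PySem.Set.ofList_eq_self_of_nodup _ (List.nodup_singleton d)
  set bound := 1 + g.length + (g.map (fun p => p.2.length)).sum with hbound
  obtain ⟨hndR, hsupR, hminR, hclR⟩ :=
    iterExpand_spec g (insert d (uniA g))
      (fun x y hy => Finset.mem_insert_of_mem (succsOf_subset_uni g x y hy))
      bound (PySem.Set.ofList [d])
      (by rw [hd1]; exact List.nodup_singleton d)
      (by rw [hd1]; intro x hx; rw [List.mem_singleton] at hx; subst hx; exact Finset.mem_insert_self _ _)
  set R := iterExpand g bound (PySem.Set.ofList [d]) with hR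
  have hdR : d ∈ R := hsupR d (by rw [hd1]; exact List.mem_singleton_self d)
  -- the fuel exceeds the number of elements the set can still pick up
  have hfuel : ((insert d (uniA g)) \ (PySem.Set.ofList [d]).toFinset).card < bound := by
    have hsub : (insert d (uniA g)) \ (PySem.Set.ofList [d]).toFinset ⊆ uniA g := by
      intro y hy
      rw [Finset.mem_sdiff] at hy
      rcases Finset.mem_insert.mp hy.1 with rfl | h
      · exact absurd (by rw [hd1]; simp) hy.2
      · exact h
    have h1 : (uniA g).card ≤ (g.map Prod.fst ++ g.flatMap Prod.snd).length :=
      List.toFinset_card_le _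
    have h2 : (g.flatMap Prod.snd).length = (g.map (fun p => p.2.length)).sum := by
      simp [List.length_flatMap]
    have h3 := Finset.card_le_card hsub
    simp only [List.length_append, List.length_map] at h1
    omega
  have hclRf : ∀ x ∈ R.toFinset, ∀ y ∈ succsOf g x, y ∈ R.toFinset := by
    intro x hx y hy
    exact List.mem_toFinset.mpr (hclR hfuel x (List.mem_toFinset.mp hx) y hy)
  have hSR : S.toFinset = R.toFinset := by
    apply Finset.Subset.antisymm
    · refine hminA R.toFinset (by simp [PySem.Set.empty]) ?_ hclRf
      intro x hx
      rw [List.mem_singleton] at hx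
      subst hx
      exact List.mem_toFinset.mpr hdR
    · intro x hx
      refine hminR S.toFinset hclA ?_ x (List.mem_toFinset.mp hx)
      intro y hy
      rw [hd1, List.mem_singleton] at hy
      rw [hy]
      exact hstkA d (List.mem_singleton_self d)
  rw [heq]
  constructor
  · simp only []
    rw [hSR, List.toFinset_card_of_nodup hndR]
    simp [PySem.Set.empty]
  · simp only []
    rw [hSR, List.sum_toFinset _ hndR]
    simp [PySem.Set.empty]

-- ===== VERDICT (by name: the statement is the Claim_ definition above) =====
theorem find_graph_type_spec : Claim_equal_find_graph_type := by
  intro graph dot _ _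
  unfold Spec_find_graph_type find_graph_type find_graph_type_alt
  have hfun : (fun (t : Int × Int × Int) d =>
      let r := loopA graph PySem.Set.empty [d] 0 0
      if r.2.1 = r.2.2 then (t.1 + 1, t.2.1, t.2.2)
      else if r.2.2 = r.2.1 - 1 then (t.1, t.2.1 + 1, t.2.2)
      else (t.1, t.2.1, t.2.2 + 1)) =
      (fun (t : Int × Int × Int) d =>
      let reach := iterExpand graph (1 + graph.length + (graph.map (fun p => p.2.length)).sum) (PySem.Set.ofList [d])
      let vertex_cnt : Int := reach.length
      let edge_cnt : Int := (reach.map (fun x => ((succsOf graph x).length : Int))).sum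
      if vertex_cnt = edge_cnt then (t.1 + 1, t.2.1, t.2.2)
      else if edge_cnt = vertex_cnt - 1 then (t.1, t.2.1 + 1, t.2.2)
      else (t.1, t.2.1, t.2.2 + 1)) := by
    funext t d
    obtain ⟨h1, h2⟩ := counts_eq graph d
    simp only [h1, h2]
  rw [hfun]
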